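-- pv_equiv track=rewrite | github.com/rspraneeth/DSA-and-others | leetcode/findAndReplacePattern.py | findAndReplacePattern1
-- ===== SOURCE A (Python) =====
-- def findAndReplacePattern1(words, pattern):
--     """Approach: We normalise a string to a particular pattern, Eg:'aab' is '001', 'qqf' is '001', 'qfq' is '010'.
--      aab matches with qqf."""
--     def normalise(string):
--         word_list = []
--         num_list = []
--         for k in string:
--             if k in word_list:
--                 num_list.append(word_list.index(k))
--             else:
--                 word_list.append(k)
--                 num_list.append(word_list.index(k))
--         return num_list
--
--     ans = []
--     plist = normalise(pattern)
--     for word in words: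
--         wlist = normalise(word)
--         if wlist == plist:
--             ans.append(word)
--
--     return ans
-- ===== SOURCE B (Python) =====
-- def findAndReplacePattern1(words, pattern):
--     def matches(word):
--         if len(word) != len(pattern):
--             return False
--         f, g = {}, {}
--         for a, b in zip(word, pattern):
--             if f.setdefault(a, b) != b or g.setdefault(b, a) != a:
--                 return False
--         return True
--     return [w for w in words if matches(w)]
-- ===== Notes on version B (the rewrite author's own statement) =====
-- stated objective: faster
-- what changed: B computes no canonical form at all: each word is tested against the pattern directly by a single zipped pass maintaining two char-to-char maps (word->pattern and pattern->word) with early exit on the first conflict, instead of A's normalisation of every string to an index list via repeated 'in'/'.index' linear scans and list comparison.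
import Mathlib
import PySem

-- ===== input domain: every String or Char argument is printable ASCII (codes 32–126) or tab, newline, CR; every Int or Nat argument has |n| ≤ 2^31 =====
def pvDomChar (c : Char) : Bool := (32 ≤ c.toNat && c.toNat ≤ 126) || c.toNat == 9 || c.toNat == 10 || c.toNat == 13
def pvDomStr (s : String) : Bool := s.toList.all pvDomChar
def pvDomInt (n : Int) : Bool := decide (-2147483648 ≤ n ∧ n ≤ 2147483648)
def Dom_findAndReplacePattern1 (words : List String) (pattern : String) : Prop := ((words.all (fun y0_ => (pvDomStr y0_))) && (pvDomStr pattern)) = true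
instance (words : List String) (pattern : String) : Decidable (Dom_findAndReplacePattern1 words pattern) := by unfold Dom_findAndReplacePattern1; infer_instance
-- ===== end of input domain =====

-- B replaces A's per-string normalisation (repeated 'in'/'.index' scans, O(L²) per word)
-- by a direct two-dict bijection check of each word against the pattern in one zipped pass.

-- ===== PORT A =====
-- A's normalise: word_list / num_list with 'in' and '.index' scans; '.index' result is
-- always found here (port uses '(index? …).getD 0', exact since membership guarantees some).
def pvNormA (s : String) : List Int :=
  (s.toList.foldl
    (fun (st : List Char × List Int) k =>
      if k ∈ st.1 then
        (st.1, st.2 ++ [(((PySem.List.index? st.1 k).getD 0 : Nat) : Int)])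
      else
        (st.1 ++ [k], st.2 ++ [(((PySem.List.index? (st.1 ++ [k]) k).getD 0 : Nat) : Int)]))
    ([], [])).2

def findAndReplacePattern1 (words : List String) (pattern : String) : List String :=
  let plist := pvNormA pattern
  words.foldl (fun ans word => if pvNormA word = plist then ans ++ [word] else ans) []

-- ===== PORT B =====
-- B's loop over zip(word, pattern): two dicts f : word→pattern, g : pattern→word,
-- setdefault on each side, early False on the first conflict.
def pvIsoLoop (prs : List (Char × Char)) (f g : PySem.Dict Char Char) : Bool :=
  match prs with
  | [] => true
  | (a, b) :: rest =>
    let fv := f.getD a b            -- value returned by f.setdefault(a, b)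
    let f' := f.setdefault a b
    if fv ≠ b then false
    else
      let gv := g.getD b a          -- value returned by g.setdefault(b, a)
      let g' := g.setdefault b a
      if gv ≠ a then false
      else pvIsoLoop rest f' g'

def pvMatches (word pattern : List Char) : Bool :=
  if word.length ≠ pattern.length then false
  else pvIsoLoop (word.zip pattern) PySem.Dict.empty PySem.Dict.empty

def findAndReplacePattern1_alt (words : List String) (pattern : String) : List String :=
  words.filter (fun w => pvMatches w.toList pattern.toList)

-- ===== PRECONDITION & SPEC =====
def Spec_findAndReplacePattern1 (words : List String) (pattern : String) (out : List String) : Prop := out = findAndReplacePattern1_alt words pattern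
instance (words : List String) (pattern : String) (out : List String) : Decidable (Spec_findAndReplacePattern1 words pattern out) := by unfold Spec_findAndReplacePattern1; infer_instance

-- ===== CLAIM (what is proved, stated in full; the proofs are below) =====
def Claim_equal_findAndReplacePattern1 : Prop := ∀ (words : List String) (pattern : String), Dom_findAndReplacePattern1 words pattern → Spec_findAndReplacePattern1 words pattern (findAndReplacePattern1 words pattern)

-- ===== LEMMAS AND PROOFS =====

-- A's normalise loop with the accumulated nums stripped out (proof-side view of pvNormA).
def pvNormT (cs : List Char) (wl : List Char) : List Int :=
  (cs.foldl
    (fun (st : List Char × List Int) k =>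
      if k ∈ st.1 then
        (st.1, st.2 ++ [(((PySem.List.index? st.1 k).getD 0 : Nat) : Int)])
      else
        (st.1 ++ [k], st.2 ++ [(((PySem.List.index? (st.1 ++ [k]) k).getD 0 : Nat) : Int)]))
    (wl, [])).2

theorem pvNormA_eq_T (s : String) : pvNormA s = pvNormT s.toList [] := rfl

theorem pvNormT_factor (cs : List Char) (wl : List Char) (nums : List Int) :
    (cs.foldl
      (fun (st : List Char × List Int) k =>
        if k ∈ st.1 then
          (st.1, st.2 ++ [(((PySem.List.index? st.1 k).getD 0 : Nat) : Int)])
        else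
          (st.1 ++ [k], st.2 ++ [(((PySem.List.index? (st.1 ++ [k]) k).getD 0 : Nat) : Int)]))
      (wl, nums)).2 = nums ++ pvNormT cs wl := by
  induction cs generalizing wl nums with
  | nil => simp [pvNormT]
  | cons k rest ih =>
    simp only [pvNormT, List.foldl_cons]
    by_cases hk : k ∈ wl
    · simp only [hk, if_true]
      rw [ih wl (nums ++ _), ih wl ([] ++ _)]
      simp
    · simp only [hk, if_false]
      rw [ih (wl ++ [k]) (nums ++ _), ih (wl ++ [k]) ([] ++ _)]
      simp

theorem pvNormT_cons_mem {k : Char} {wl : List Char} (cs : List Char) (hk : k ∈ wl) :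
    pvNormT (k :: cs) wl = (((PySem.List.index? wl k).getD 0 : Nat) : Int) :: pvNormT cs wl := by
  simp only [pvNormT, List.foldl_cons, hk, if_true]
  rw [pvNormT_factor]
  rfl

theorem pvNormT_cons_not_mem {k : Char} {wl : List Char} (cs : List Char) (hk : k ∉ wl) :
    pvNormT (k :: cs) wl = ((wl.length : Nat) : Int) :: pvNormT cs (wl ++ [k]) := by
  simp only [pvNormT, List.foldl_cons, hk, if_false]
  rw [pvNormT_factor, PySem.List.index?_append_singleton_self wl k hk]
  rfl

theorem pvNormT_length (cs : List Char) (wl : List Char) : (pvNormT cs wl).length = cs.length := by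
  induction cs generalizing wl with
  | nil => rfl
  | cons k rest ih =>
    by_cases hk : k ∈ wl
    · rw [pvNormT_cons_mem rest hk]; simp [ih]
    · rw [pvNormT_cons_not_mem rest hk]; simp [ih]

-- One unfolding step of B's loop (setdefault returns d.getD k v and then inserts if absent).
theorem pvIsoLoop_cons (a b : Char) (rest : List (Char × Char)) (f g : PySem.Dict Char Char) :
    pvIsoLoop ((a, b) :: rest) f g =
      if f.getD a b ≠ b then false
      else if g.getD b a ≠ a then false
      else pvIsoLoop rest (f.setdefault a b) (g.setdefault b a) := rfl

-- A pair recorded in an injective pairing sits at the same first index on both sides.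
theorem pv_idx_pair (prs : List (Char × Char)) (a b : Char) (hmem : (a, b) ∈ prs)
    (hfn : (prs.map Prod.fst).Nodup) (hsn : (prs.map Prod.snd).Nodup) :
    PySem.List.index? (prs.map Prod.fst) a = PySem.List.index? (prs.map Prod.snd) b := by
  induction prs with
  | nil => simp at hmem
  | cons p t ih =>
    obtain ⟨c, d⟩ := p
    simp only [List.map_cons] at hfn hsn ⊢
    rcases List.mem_cons.1 hmem with heq | htail
    · obtain ⟨rfl, rfl⟩ := Prod.mk.inj heq
      rw [PySem.List.index?_cons_self, PySem.List.index?_cons_self]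
    · have ha : a ∈ t.map Prod.fst := List.mem_map.2 ⟨(a, b), htail, rfl⟩
      have hb : b ∈ t.map Prod.snd := List.mem_map.2 ⟨(a, b), htail, rfl⟩
      have hca : c ≠ a := fun h => (List.nodup_cons.1 hfn).1 (h ▸ ha)
      have hdb : d ≠ b := fun h => (List.nodup_cons.1 hsn).1 (h ▸ hb)
      rw [PySem.List.index?_cons_of_ne _ hca, PySem.List.index?_cons_of_ne _ hdb,
        ih htail (List.nodup_cons.1 hfn).2 (List.nodup_cons.1 hsn).2]

-- On a Nodup list, distinct members have distinct first indices.
theorem pv_idx_inj {l : List Char} {x y : Char} (_hnd : l.Nodup) (hx : x ∈ l) (hy : y ∈ l)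
    (hne : x ≠ y) :
    (PySem.List.index? l x).getD 0 ≠ (PySem.List.index? l y).getD 0 := by
  obtain ⟨i, hi⟩ := Option.isSome_iff_exists.1 ((PySem.List.index?_isSome_iff l x).2 hx)
  obtain ⟨j, hj⟩ := Option.isSome_iff_exists.1 ((PySem.List.index?_isSome_iff l y).2 hy)
  obtain ⟨hik, hxi, _⟩ := PySem.List.getElem_of_index?_eq_some hi
  obtain ⟨hjk, hyj, _⟩ := PySem.List.getElem_of_index?_eq_some hj
  rw [hi, hj]
  simp only [Option.getD_some]
  intro hij
  apply hne
  subst hij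
  rw [← hxi, ← hyj]

theorem pv_idx_lt {l : List Char} {x : Char} (hx : x ∈ l) :
    (PySem.List.index? l x).getD 0 < l.length := by
  obtain ⟨i, hi⟩ := Option.isSome_iff_exists.1 ((PySem.List.index?_isSome_iff l x).2 hx)
  obtain ⟨hik, _, _⟩ := PySem.List.getElem_of_index?_eq_some hi
  rw [hi]; exact hik

-- The main invariant lemma: B's zipped two-dict loop succeeds iff A's two normalise
-- tails agree, given dicts f, g recording exactly the pairing prs0 built so far.
theorem pv_main (csw : List Char) (csp : List Char) (prs0 : List (Char × Char))
    (f g : PySem.Dict Char Char)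
    (hlen : csw.length = csp.length)
    (hfn : (prs0.map Prod.fst).Nodup) (hsn : (prs0.map Prod.snd).Nodup)
    (hf : ∀ p ∈ prs0, f.get? p.1 = some p.2)
    (hg : ∀ p ∈ prs0, g.get? p.2 = some p.1)
    (hfc : ∀ c, f.contains c = decide (c ∈ prs0.map Prod.fst))
    (hgc : ∀ c, g.contains c = decide (c ∈ prs0.map Prod.snd)) :
    (pvIsoLoop (csw.zip csp) f g = true ↔
      pvNormT csw (prs0.map Prod.fst) = pvNormT csp (prs0.map Prod.snd)) := by
  induction csw generalizing csp prs0 f g with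
  | nil =>
    cases csp with
    | nil => simp [pvIsoLoop, pvNormT]
    | cons b t => simp at hlen
  | cons a csw' ih =>
    cases csp with
    | nil => simp at hlen
    | cons b csp' =>
      have hlen' : csw'.length = csp'.length := by simpa using hlen
      simp only [List.zip_cons_cons]
      rw [pvIsoLoop_cons]
      by_cases ha : a ∈ prs0.map Prod.fst
      · -- a already mapped, to some y
        have hay : ∃ y, (a, y) ∈ prs0 := by
          obtain ⟨p, hp, he⟩ := List.mem_map.1 ha
          exact ⟨p.2, by rw [← he]; simpa using hp⟩
        obtain ⟨y, hpmem⟩ := hay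
        have hfa : f.get? a = some y := hf _ hpmem
        have hconta : f.contains a = true := by rw [hfc]; simpa using ha
        have hfv : f.getD a b = y := PySem.Dict.getD_of_get?_eq_some f b hfa
        have hfset : f.setdefault a b = f := PySem.Dict.setdefault_of_contains f b hconta
        have hy : y ∈ prs0.map Prod.snd := List.mem_map.2 ⟨(a, y), hpmem, rfl⟩
        have hidx := pv_idx_pair prs0 a y hpmem hfn hsn
        by_cases hby : y = b
        · subst hby
          have hga : g.get? y = some a := hg _ hpmem
          have hcontb : g.contains y = true := by rw [hgc]; simpa using hy
          have hgv : g.getD y a = a := PySem.Dict.getD_of_get?_eq_some g a hga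
          have hgset : g.setdefault y a = g := PySem.Dict.setdefault_of_contains g a hcontb
          rw [hfv, hfset, hgv, hgset, if_neg (by simp), if_neg (by simp)]
          rw [pvNormT_cons_mem csw' ha, pvNormT_cons_mem csp' hy]
          rw [ih csp' prs0 f g hlen' hfn hsn hf hg hfc hgc, hidx, List.cons_eq_cons]
          simp
        · -- conflict on the f side: the loop fails and the heads differ
          rw [hfv, if_pos hby]
          simp only [Bool.false_eq_true, false_iff]
          intro h
          by_cases hb : b ∈ prs0.map Prod.snd
          · rw [pvNormT_cons_mem csw' ha, pvNormT_cons_mem csp' hb] at h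
            have hne := pv_idx_inj hsn hy hb hby
            have heads : ((((PySem.List.index? (prs0.map Prod.fst) a).getD 0 : Nat)) : Int)
                = (((PySem.List.index? (prs0.map Prod.snd) b).getD 0 : Nat) : Int) :=
              (List.cons_eq_cons.1 h).1
            rw [hidx] at heads
            exact hne (by exact_mod_cast heads)
          · rw [pvNormT_cons_mem csw' ha, pvNormT_cons_not_mem csp' hb] at h
            have hlt := pv_idx_lt hy
            have heads : ((((PySem.List.index? (prs0.map Prod.fst) a).getD 0 : Nat)) : Int)
                = (((prs0.map Prod.snd).length : Nat) : Int) := (List.cons_eq_cons.1 h).1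
            rw [hidx] at heads
            have : (PySem.List.index? (prs0.map Prod.snd) y).getD 0
                = (prs0.map Prod.snd).length := by exact_mod_cast heads
            omega
      · -- a is fresh
        have hconta : f.contains a = false := by rw [hfc]; simpa using ha
        have hfv : f.getD a b = b := PySem.Dict.getD_of_not_contains f b hconta
        have hfset : f.setdefault a b = f.insert a b :=
          PySem.Dict.setdefault_of_not_contains f b hconta
        rw [hfv, if_neg (by simp)]
        by_cases hb : b ∈ prs0.map Prod.snd
        · -- b already used by some x ≠ a: the loop fails on the g side
          have hbx : ∃ x, (x, b) ∈ prs0 := by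
            obtain ⟨p, hp, he⟩ := List.mem_map.1 hb
            exact ⟨p.1, by rw [← he]; simpa using hp⟩
          obtain ⟨x, hpmem⟩ := hbx
          have hgb : g.get? b = some x := hg _ hpmem
          have hgv : g.getD b a = x := PySem.Dict.getD_of_get?_eq_some g a hgb
          have hxa : x ≠ a := fun h =>
            ha (List.mem_map.2 ⟨(x, b), hpmem, by simp [h]⟩)
          rw [hgv, if_pos hxa]
          simp only [Bool.false_eq_true, false_iff]
          intro h
          rw [pvNormT_cons_not_mem csw' ha, pvNormT_cons_mem csp' hb] at h
          have hlt := pv_idx_lt hb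
          have heads : (((prs0.map Prod.fst).length : Nat) : Int)
              = (((PySem.List.index? (prs0.map Prod.snd) b).getD 0 : Nat) : Int) :=
            (List.cons_eq_cons.1 h).1
          have heq : (prs0.map Prod.fst).length
              = (PySem.List.index? (prs0.map Prod.snd) b).getD 0 := by exact_mod_cast heads
          have hll : (prs0.map Prod.fst).length = (prs0.map Prod.snd).length := by simp
          omega
        · -- both fresh: extend the pairing
          have hcontb : g.contains b = false := by rw [hgc]; simpa using hb
          have hgv : g.getD b a = a := PySem.Dict.getD_of_not_contains g a hcontb
          have hgset : g.setdefault b a = g.insert b a :=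
            PySem.Dict.setdefault_of_not_contains g a hcontb
          rw [hgv, if_neg (by simp), hfset, hgset]
          rw [pvNormT_cons_not_mem csw' ha, pvNormT_cons_not_mem csp' hb]
          have hrec := ih csp' (prs0 ++ [(a, b)]) (f.insert a b) (g.insert b a) hlen'
            (by
              simp only [List.map_append, List.map_cons, List.map_nil]
              simp only [List.nodup_append, List.nodup_singleton, true_and]
              refine ⟨hfn, ?_⟩
              simp only [List.mem_map]
              intro z hx w hw hzw
              simp only [List.mem_singleton] at hw
              subst hw
              subst hzw
              exact ha (List.mem_map.2 hx))
            (by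
              simp only [List.map_append, List.map_cons, List.map_nil]
              simp only [List.nodup_append, List.nodup_singleton, true_and]
              refine ⟨hsn, ?_⟩
              simp only [List.mem_map]
              intro z hx w hw hzw
              simp only [List.mem_singleton] at hw
              subst hw
              subst hzw
              exact hb (List.mem_map.2 hx))
            (by
              intro p hp
              rcases List.mem_append.1 hp with hold | hnew
              · have hne : p.1 ≠ a := fun h =>
                  ha (List.mem_map.2 ⟨p, hold, h⟩)
                rw [PySem.Dict.get?_insert_of_ne _ _ hne]
                exact hf p hold
              · simp only [List.mem_singleton] at hnew
                subst hnew
                exact PySem.Dict.get?_insert_self ..)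
            (by
              intro p hp
              rcases List.mem_append.1 hp with hold | hnew
              · have hne : p.2 ≠ b := fun h =>
                  hb (List.mem_map.2 ⟨p, hold, h⟩)
                rw [PySem.Dict.get?_insert_of_ne _ _ hne]
                exact hg p hold
              · simp only [List.mem_singleton] at hnew
                subst hnew
                exact PySem.Dict.get?_insert_self ..)
            (by
              intro c
              rw [PySem.Dict.contains_insert, hfc]
              by_cases hca : c = a <;> simp [hca])
            (by
              intro c
              rw [PySem.Dict.contains_insert, hgc]
              by_cases hcb : c = b <;> simp [hcb])
          simp only [List.map_append, List.map_cons, List.map_nil] at hrec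
          rw [hrec, List.cons_eq_cons]
          have hll : (prs0.map Prod.fst).length = (prs0.map Prod.snd).length := by simp
          simp [hll]

-- Top level: B's per-word test equals A's normalise-and-compare.
theorem pv_matches_iff (w p : String) :
    (pvMatches w.toList p.toList = true) ↔ pvNormA w = pvNormA p := by
  rw [pvNormA_eq_T, pvNormA_eq_T]
  unfold pvMatches
  by_cases hlen : w.toList.length = p.toList.length
  · rw [if_neg (by simpa using hlen)]
    exact pv_main w.toList p.toList [] PySem.Dict.empty PySem.Dict.empty hlen
      (by simp) (by simp) (by simp) (by simp)
      (by intro c; simp [PySem.Dict.contains_empty])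
      (by intro c; simp [PySem.Dict.contains_empty])
  · rw [if_pos (by simpa using hlen)]
    constructor
    · intro h; exact absurd h (by simp)
    · intro h
      exfalso
      have := congrArg List.length h
      rw [pvNormT_length, pvNormT_length] at this
      exact hlen this

-- ===== VERDICT (by name: the statement is the Claim_ definition above) =====
theorem findAndReplacePattern1_spec : Claim_equal_findAndReplacePattern1 := by
  intro words pattern _
  unfold Spec_findAndReplacePattern1
  simp only [findAndReplacePattern1, findAndReplacePattern1_alt]
  rw [PySem.List.foldl_append_ite_eq_filter]
  apply List.filter_congr
  intro w _
  rw [Bool.eq_iff_iff]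
  simp only [decide_eq_true_eq]
  exact (pv_matches_iff w pattern).symm
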